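-- pv_equiv track=rewrite | github.com/bryanlabs/staking-rewards | staking-rewards.py | chunk_symbols_and_dates
-- ===== SOURCE A (Python) =====
-- def chunk_symbols_and_dates(symbols_to_dates, len_chunks):
--
--     values = {}
--     length = 0
--     for key in symbols_to_dates:
--         for date in symbols_to_dates[key]:
--             if key in values:
--                 values[key].append(date)
--                 length+=1
--             else:
--                 values[key] = [date]
--                 length+=1
--             if length == len_chunks:
--                 yield values
--                 values = {}
--                 length = 0
--
--     #last yield returns last chunk
--     yield values
-- ===== SOURCE B (Python) =====
-- def chunk_symbols_and_dates(symbols_to_dates, len_chunks):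
--     # Flatten to (symbol, date) pairs, then emit fixed-size batches by slicing;
--     # the trailing (possibly empty) remainder batch is always emitted, like A's final yield.
--     pairs = [(k, d) for k, ds in symbols_to_dates.items() for d in ds]
--
--     def group(ps):
--         out = {}
--         for k, d in ps:
--             out[k] = out.get(k, []) + [d]
--         return out
--
--     if len_chunks <= 0:
--         yield group(pairs)
--         return
--     while len(pairs) >= len_chunks:
--         yield group(pairs[:len_chunks])
--         pairs = pairs[len_chunks:]
--     yield group(pairs)
-- ===== Notes on version B (the rewrite author's own statement) =====
-- stated objective: alternative
-- what changed: B flattens the dict to a (symbol,date) pair list once and then slices fixed-size batches off the front (grouping each slice into a dict), instead of A's single incremental pass that grows one dict with a running counter and resets it at each boundary; the unconditional trailing (possibly empty) chunk is the final remainder slice.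
import Mathlib
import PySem

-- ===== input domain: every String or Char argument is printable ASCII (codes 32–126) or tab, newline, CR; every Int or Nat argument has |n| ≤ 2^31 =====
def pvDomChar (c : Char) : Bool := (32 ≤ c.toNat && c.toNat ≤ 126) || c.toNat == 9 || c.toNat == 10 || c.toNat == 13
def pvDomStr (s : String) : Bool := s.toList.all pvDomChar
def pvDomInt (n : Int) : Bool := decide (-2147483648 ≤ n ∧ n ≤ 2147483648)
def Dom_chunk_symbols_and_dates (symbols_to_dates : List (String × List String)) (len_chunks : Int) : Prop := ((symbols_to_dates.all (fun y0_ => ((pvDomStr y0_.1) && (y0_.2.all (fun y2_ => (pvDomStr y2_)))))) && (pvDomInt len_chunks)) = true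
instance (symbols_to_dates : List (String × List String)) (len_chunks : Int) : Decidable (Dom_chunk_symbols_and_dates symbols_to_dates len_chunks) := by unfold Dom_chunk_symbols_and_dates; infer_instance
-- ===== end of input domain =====

-- B slices fixed-size batches off a flattened (symbol,date) pair list instead of A's
-- incremental dict-with-counter pass (alternative decomposition, same cost).


-- ===== PORT A =====
-- 'for key in symbols_to_dates' iterates the dict's keys; 'symbols_to_dates[key]' is the
-- lookup ((PySem.Dict.mk …).getD key []), exact since every iterated key is present.
-- Each yielded dict is recorded as its items list.
def chunk_symbols_and_dates (symbols_to_dates : List (String × List String)) (len_chunks : Int) : List (List (String × List String)) :=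
  let d0 : PySem.Dict String (List String) := PySem.Dict.mk symbols_to_dates
  let fin :=
    d0.keys.foldl
      (fun (st : List (List (String × List String)) × PySem.Dict String (List String) × Int) key =>
        (d0.getD key []).foldl
          (fun st date =>
            let values :=
              if st.2.1.contains key then st.2.1.modify key [] (· ++ [date])
              else st.2.1.insert key [date]
            let length := st.2.2 + 1
            if length == len_chunks then (st.1 ++ [values.items], PySem.Dict.empty, 0)
            else (st.1, values, length))
          st)
      ([], PySem.Dict.empty, 0)
  fin.1 ++ [fin.2.1.items]

-- ===== PORT B =====
-- group: out[k] = out.get(k, []) + [d]  (= Dict.modify)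
def bGroup (ps : List (String × String)) : PySem.Dict String (List String) :=
  ps.foldl (fun out kd => out.modify kd.1 [] (· ++ [kd.2])) PySem.Dict.empty

-- while len(pairs) >= len_chunks: yield group(pairs[:len_chunks]); pairs = pairs[len_chunks:]
-- the slices pairs[:L] / pairs[L:] are take/drop, exact here since 0 < L on every call.
def bChunks (len_chunks : Int) (ps : List (String × String)) : List (List (String × List String)) :=
  if h : 0 < len_chunks ∧ len_chunks ≤ (ps.length : Int) then
    (bGroup (ps.take len_chunks.toNat)).items :: bChunks len_chunks (ps.drop len_chunks.toNat)
  else [(bGroup ps).items]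
termination_by ps.length
decreasing_by simp only [List.length_drop]; omega

def chunk_symbols_and_dates_alt (symbols_to_dates : List (String × List String)) (len_chunks : Int) : List (List (String × List String)) :=
  let pairs := symbols_to_dates.flatMap (fun kv => kv.2.map (fun d => (kv.1, d)))
  if len_chunks ≤ 0 then [(bGroup pairs).items]
  else bChunks len_chunks pairs

-- ===== PRECONDITION & SPEC =====
-- Pre_ excludes association lists with duplicate keys: they do not represent any Python dict
-- (A's input is a dict, whose keys are unique), so A's behaviour there is not defined.
def Pre_chunk_symbols_and_dates (symbols_to_dates : List (String × List String)) (len_chunks : Int) : Prop :=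
  (symbols_to_dates.map Prod.fst).Nodup
instance (symbols_to_dates : List (String × List String)) (len_chunks : Int) : Decidable (Pre_chunk_symbols_and_dates symbols_to_dates len_chunks) := by unfold Pre_chunk_symbols_and_dates; infer_instance

def pvWitness_chunk_symbols_and_dates : (List (String × List String)) × Int :=
  ([("ATOM", ["2021-01-01", "2021-01-02"]), ("OSMO", ["2021-01-03"])], 2)

def Spec_chunk_symbols_and_dates (symbols_to_dates : List (String × List String)) (len_chunks : Int) (out : List (List (String × List String))) : Prop := out = chunk_symbols_and_dates_alt symbols_to_dates len_chunks
instance (symbols_to_dates : List (String × List String)) (len_chunks : Int) (out : List (List (String × List String))) : Decidable (Spec_chunk_symbols_and_dates symbols_to_dates len_chunks out) := by unfold Spec_chunk_symbols_and_dates; infer_instance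

-- ===== CLAIM (what is proved, stated in full; the proofs are below) =====
def Claim_equal_chunk_symbols_and_dates : Prop := ∀ (symbols_to_dates : List (String × List String)) (len_chunks : Int), Dom_chunk_symbols_and_dates symbols_to_dates len_chunks → Pre_chunk_symbols_and_dates symbols_to_dates len_chunks → Spec_chunk_symbols_and_dates symbols_to_dates len_chunks (chunk_symbols_and_dates symbols_to_dates len_chunks)

-- ===== LEMMAS AND PROOFS =====

-- the pair-level step of A's loop body
def stepA (L : Int) (st : List (List (String × List String)) × PySem.Dict String (List String) × Int)
    (p : String × String) : List (List (String × List String)) × PySem.Dict String (List String) × Int :=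
  let values := st.2.1.modify p.1 [] (· ++ [p.2])
  if st.2.2 + 1 == L then (st.1 ++ [values.items], PySem.Dict.empty, 0)
  else (st.1, values, st.2.2 + 1)

lemma addA_eq_modify (d : PySem.Dict String (List String)) (k v : String) :
    (if d.contains k then d.modify k [] (· ++ [v]) else d.insert k [v]) = d.modify k [] (· ++ [v]) := by
  by_cases h : d.contains k = true
  · simp [h]
  · simp only [Bool.not_eq_true] at h
    simp [h, PySem.Dict.modify, PySem.Dict.getD_of_not_contains (h := h)]

-- A's double loop (keys, then dates via lookup) is the single pair-level loop over the flattened list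
lemma flattenA (std : List (String × List String)) (L : Int)
    (hnd : (std.map Prod.fst).Nodup) :
    chunk_symbols_and_dates std L =
      (let fin := (std.flatMap (fun kv => kv.2.map (fun d => (kv.1, d)))).foldl (stepA L)
        ([], PySem.Dict.empty, 0)
       fin.1 ++ [fin.2.1.items]) := by
  have hkeys : (PySem.Dict.mk std).keys.Nodup := by
    rw [PySem.Dict.keys_mk]; exact hnd
  simp only [chunk_symbols_and_dates, PySem.Dict.keys_mk]
  rw [List.foldl_map, List.foldl_flatMap]
  refine congrArg (fun fin : List (List (String × List String)) × PySem.Dict String (List String) × Int =>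
    fin.1 ++ [fin.2.1.items]) ?_
  refine PySem.List.foldl_congr_mem _ _ _ _ ?_
  intro st kv hmem
  have hget : (PySem.Dict.mk std).getD kv.1 [] = kv.2 :=
    PySem.Dict.getD_of_mem_items _ (by simpa using hmem) hkeys []
  rw [hget, List.foldl_map]
  refine PySem.List.foldl_congr_mem _ _ _ _ ?_
  intro acc x _
  simp only [stepA, addA_eq_modify]

-- while the counter stays short of L (or L ≤ counter, never reachable again), no chunk is emitted
lemma run_small (L : Int) (ps : List (String × String)) :
    ∀ (acc : List (List (String × List String))) (vals : PySem.Dict String (List String)) (n : Int),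
    (n + (ps.length : Int) < L ∨ L ≤ n) →
    ps.foldl (stepA L) (acc, vals, n) =
      (acc, ps.foldl (fun out kd => out.modify kd.1 [] (· ++ [kd.2])) vals, n + (ps.length : Int)) := by
  induction ps with
  | nil => intro acc vals n _; simp
  | cons p ps ih =>
    intro acc vals n h
    have hne : ((n + 1 : Int) == L) = false := by
      simp only [List.length_cons] at h; push_cast at h
      simp only [beq_eq_false_iff_ne, ne_eq]; omega
    simp only [List.foldl_cons, stepA, hne, if_false, Bool.false_eq_true]
    rw [ih]
    · simp only [List.length_cons, Prod.mk.injEq]; push_cast; refine ⟨trivial, trivial, by ring⟩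
    · rcases h with h | h
      · left; simp only [List.length_cons] at h; push_cast at h ⊢; omega
      · right; omega

-- a run that ends exactly at the boundary emits one chunk and resets
lemma run_full (L : Int) (ps : List (String × String)) :
    ∀ (acc : List (List (String × List String))) (vals : PySem.Dict String (List String)) (n : Int),
    0 ≤ n → n + (ps.length : Int) = L → ps ≠ [] →
    ps.foldl (stepA L) (acc, vals, n) =
      (acc ++ [(ps.foldl (fun out kd => out.modify kd.1 [] (· ++ [kd.2])) vals).items],
       PySem.Dict.empty, 0) := by
  induction ps with
  | nil => intro _ _ _ _ _ hne; exact absurd rfl hne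
  | cons p ps ih =>
    intro acc vals n hn hlen _
    rcases ps with _ | ⟨q, qs⟩
    · have ht : ((n + 1 : Int) == L) = true := by
        simp only [List.length_cons, List.length_nil] at hlen; push_cast at hlen
        simp only [beq_iff_eq]; omega
      simp [stepA, ht]
    · have hne : ((n + 1 : Int) == L) = false := by
        simp only [List.length_cons] at hlen; push_cast at hlen
        simp only [beq_eq_false_iff_ne, ne_eq]; omega
      rw [List.foldl_cons]
      have hstep : stepA L (acc, vals, n) p = (acc, vals.modify p.1 [] (· ++ [p.2]), n + 1) := by
        simp [stepA, hne]
      rw [hstep,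
        ih acc _ (n + 1) (by omega) (by simp only [List.length_cons] at hlen ⊢; push_cast at hlen ⊢; omega) (by simp)]
      rfl

-- main correspondence for 0 < L: A's pair-level loop produces exactly B's slice chunks
lemma mainA (L : Int) (hL : 0 < L) :
    ∀ (n : ℕ) (ps : List (String × String)), ps.length = n →
    ∀ (acc : List (List (String × List String))),
    (ps.foldl (stepA L) (acc, PySem.Dict.empty, 0)).1 ++
      [(ps.foldl (stepA L) (acc, PySem.Dict.empty, 0)).2.1.items] = acc ++ bChunks L ps := by
  intro n
  induction n using Nat.strong_induction_on with
  | _ n ih =>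
    intro ps hlen acc
    by_cases hc : L ≤ (ps.length : Int)
    · have h1 : 1 ≤ L.toNat := by omega
      have h2 : L.toNat ≤ ps.length := by omega
      have htake : (ps.take L.toNat).length = L.toNat := by simp [h2]
      conv_lhs => rw [← List.take_append_drop L.toNat ps, List.foldl_append]
      rw [run_full L (ps.take L.toNat) acc PySem.Dict.empty 0 le_rfl
        (by rw [htake]; omega)
        (by rw [← List.length_pos_iff, htake]; omega)]
      rw [ih (ps.drop L.toNat).length (by simp only [List.length_drop]; omega)
        (ps.drop L.toNat) rfl _]
      conv_rhs => rw [bChunks]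
      rw [dif_pos ⟨hL, hc⟩]
      simp [bGroup]
    · rw [run_small L ps acc PySem.Dict.empty 0 (Or.inl (by omega))]
      rw [bChunks, dif_neg (by omega)]
      simp [bGroup]

theorem chunk_symbols_and_dates_spec : Claim_equal_chunk_symbols_and_dates := by
  intro std L _hdom hpre
  unfold Spec_chunk_symbols_and_dates
  rw [flattenA std L hpre]
  unfold chunk_symbols_and_dates_alt
  by_cases hL : L ≤ 0
  · simp only [if_pos hL]
    rw [run_small L _ [] PySem.Dict.empty 0 (Or.inr hL)]
    simp [bGroup]
  · simp only [if_neg hL]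
    exact mainA L (by omega) _ _ rfl []
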